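-- pv_equiv track=rewrite | github.com/bthornemail/atomic-kernel-v1 | dev-docs/algorithmic_clock (1).py | bit_length
-- ===== SOURCE A (Python) =====
-- def bit_length(x):
--     """
--     Width class: how many bits are needed to represent x.
--     This is the binary digit length — the spectrum band.
--     Pure integer, no floats.
--     """
--     if x == 0:
--         return 0
--     length = 0
--     while x > 0:
--         x >>= 1
--         length += 1
--     return length
-- ===== SOURCE B (Python) =====
-- def bit_length(x):
--     """Binary digit length via the bin() string idiom; 0 for x <= 0 (as A)."""
--     return len(bin(x)) - 2 if x > 0 else 0
-- ===== Notes on version B (the rewrite author's own statement) =====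
-- stated objective: idiomatic
-- what changed: Replaces the manual shift-and-count loop by the standard len(bin(x)) - 2 string idiom (no loop at all), guarded to return 0 for non-positive x as A does.
import Mathlib
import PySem

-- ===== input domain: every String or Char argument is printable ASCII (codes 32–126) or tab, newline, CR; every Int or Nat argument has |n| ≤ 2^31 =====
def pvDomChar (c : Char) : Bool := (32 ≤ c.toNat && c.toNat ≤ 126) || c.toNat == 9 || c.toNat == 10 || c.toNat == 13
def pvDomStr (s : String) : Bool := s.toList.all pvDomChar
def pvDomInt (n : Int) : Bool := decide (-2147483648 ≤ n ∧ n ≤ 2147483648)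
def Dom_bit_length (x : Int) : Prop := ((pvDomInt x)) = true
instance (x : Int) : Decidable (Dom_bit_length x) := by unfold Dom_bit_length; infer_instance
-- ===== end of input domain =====

-- B replaces A's shift-and-count loop by the len(bin(x)) - 2 string idiom (idiomatic; return value only).

-- ===== PORT A =====
-- the 'while x > 0' loop: x >>= 1 (= floor-division by 2); length += 1
def pvALoop (x : Int) (len : Int) : Int :=
  if h : x > 0 then pvALoop (PySem.Int.floordiv x 2) (len + 1) else len
termination_by x.toNat
decreasing_by
  have := PySem.Int.floordiv_eq_ediv_of_pos (a := x) (b := 2) (by omega)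
  omega

def bit_length (x : Int) : Int :=
  if x = 0 then 0 else pvALoop x 0

-- ===== PORT B =====
-- bin(n) without the '0b' prefix, for n > 0 (Python builds the digits most-significant first)
def pvBinDigits (n : Nat) : List Char :=
  if h : n = 0 then [] else pvBinDigits (n / 2) ++ [if n % 2 = 1 then '1' else '0']
decreasing_by omega

-- len(bin(x)) - 2 if x > 0 else 0
def bit_length_alt (x : Int) : Int :=
  if x > 0 then ((pvBinDigits x.toNat).length : Int) else 0

-- ===== PRECONDITION & SPEC =====
def Spec_bit_length (x : Int) (out : Int) : Prop := out = bit_length_alt x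
instance (x : Int) (out : Int) : Decidable (Spec_bit_length x out) := by unfold Spec_bit_length; infer_instance

-- ===== CLAIM (what is proved, stated in full; the proofs are below) =====
def Claim_equal_bit_length : Prop := ∀ (x : Int), Dom_bit_length x → Spec_bit_length x (bit_length x)

-- ===== LEMMAS AND PROOFS =====
theorem pvBinDigits_len (n : Nat) (h : 0 < n) :
    (pvBinDigits n).length = (pvBinDigits (n / 2)).length + 1 := by
  rw [pvBinDigits]
  simp [Nat.pos_iff_ne_zero.mp h]

theorem pvALoop_eq (n : Nat) : ∀ len : Int, pvALoop (n : Int) len = len + (pvBinDigits n).length := by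
  induction n using Nat.strong_induction_on with
  | _ n ih =>
    intro len
    rw [pvALoop]
    by_cases h : 0 < n
    · have hdiv : PySem.Int.floordiv (n : Int) 2 = ((n / 2 : Nat) : Int) := by
        exact_mod_cast PySem.Int.floordiv_natCast n 2
      have hpos : (n : Int) > 0 := by exact_mod_cast h
      rw [dif_pos hpos, hdiv, ih (n / 2) (by omega), pvBinDigits_len n h]
      push_cast
      ring
    · have hn : n = 0 := by omega
      subst hn
      rw [pvBinDigits]
      simp

-- ===== VERDICT (by name: the statement is the Claim_ definition above) =====
theorem bit_length_spec : Claim_equal_bit_length := by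
  intro x _
  unfold Spec_bit_length bit_length bit_length_alt
  by_cases hpos : x > 0
  · have hx0 : ¬ x = 0 := by omega
    rw [if_neg hx0, if_pos hpos]
    have : x = ((x.toNat : Nat) : Int) := by omega
    rw [this, pvALoop_eq x.toNat 0]
    have hmax : (max x 0).toNat = x.toNat := by omega
    simp [hmax]
  · rw [if_neg hpos]
    by_cases hz : x = 0
    · simp [hz]
    · rw [if_neg hz, pvALoop, dif_neg hpos]
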